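-- pv_equiv track=rewrite | github.com/Sur818/Coding-Projects | python programming/package & module/word_case.py | word_capitallize
-- ===== SOURCE A (Python) =====
-- def word_capitallize(s):
-- 	s1=""
-- 	for x in s:
-- 		if x>='a' and x<='z':
-- 			m=ord(x)-97+1
-- 			s1+=chr(65+m-1)
-- 		else:
-- 			s1+=x
-- 	return s1
-- ===== SOURCE B (Python) =====
-- _TABLE = str.maketrans({chr(97 + i): chr(65 + i) for i in range(26)})
--
-- def word_capitallize(s):
--     return s.translate(_TABLE)
-- ===== Notes on version B (the rewrite author's own statement) =====
-- stated objective: faster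
-- what changed: Replaces the explicit accumulator loop with per-character ord/chr arithmetic by a translation table built once (str.maketrans for the 26 ASCII lowercase letters) applied in a single str.translate pass.
import Mathlib
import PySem

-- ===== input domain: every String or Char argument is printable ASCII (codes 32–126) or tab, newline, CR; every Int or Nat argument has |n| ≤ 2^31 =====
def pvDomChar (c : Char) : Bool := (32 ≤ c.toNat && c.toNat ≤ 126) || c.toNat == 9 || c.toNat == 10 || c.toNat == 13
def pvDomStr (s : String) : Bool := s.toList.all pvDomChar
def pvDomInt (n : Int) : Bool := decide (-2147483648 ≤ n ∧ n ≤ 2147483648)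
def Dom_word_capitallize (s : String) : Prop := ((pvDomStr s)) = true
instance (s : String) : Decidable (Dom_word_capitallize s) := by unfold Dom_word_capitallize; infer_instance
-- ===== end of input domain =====

-- B replaces A's per-character ord/chr arithmetic loop by a 26-entry translation table built once and applied in one pass (idiomatic, same cost).

-- ===== PORT A =====
-- literal port of A: accumulate s1, for each char test 'a' ≤ x ≤ 'z', push chr(65+m-1) with m = ord x - 97 + 1
def word_capitallize (s : String) : String :=
  s.toList.foldl (fun s1 x =>
    if 'a' ≤ x ∧ x ≤ 'z' then
      let m := x.toNat - 97 + 1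
      s1 ++ String.ofList [Char.ofNat (65 + m - 1)]
    else s1 ++ String.ofList [x]) ""

-- ===== PORT B =====
-- the fixed translation table (port of str.maketrans of the 26 lowercase letters)
def pvUpperTable : List (Char × Char) :=
  (List.range 26).map (fun i => (Char.ofNat (97 + i), Char.ofNat (65 + i)))

-- port of s.translate(_TABLE): one pass, table lookup with identity default
def word_capitallize_alt (s : String) : String :=
  String.ofList (s.toList.map (fun c => (pvUpperTable.lookup c).getD c))

-- ===== PRECONDITION & SPEC =====
def Spec_word_capitallize (s : String) (out : String) : Prop := out = word_capitallize_alt s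
instance (s : String) (out : String) : Decidable (Spec_word_capitallize s out) := by unfold Spec_word_capitallize; infer_instance

-- ===== CLAIM (what is proved, stated in full; the proofs are below) =====
def Claim_equal_word_capitallize : Prop := ∀ (s : String), Dom_word_capitallize s → Spec_word_capitallize s (word_capitallize s)

-- ===== LEMMAS AND PROOFS =====
def pvStepA (x : Char) : Char :=
  if 'a' ≤ x ∧ x ≤ 'z' then Char.ofNat (65 + (x.toNat - 97 + 1) - 1) else x

def pvStepB (c : Char) : Char := (pvUpperTable.lookup c).getD c

theorem pvStep_eq_ofNat : ∀ n < 128, pvStepA (Char.ofNat n) = pvStepB (Char.ofNat n) := by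
  decide

theorem pvStep_eq (c : Char) (h : pvDomChar c = true) : pvStepA c = pvStepB c := by
  have hlt : c.toNat < 128 := by
    simp [pvDomChar] at h
    omega
  have := pvStep_eq_ofNat c.toNat hlt
  simpa using this

theorem pvFoldA (l : List Char) : ∀ acc : String,
    l.foldl (fun s1 x =>
      if 'a' ≤ x ∧ x ≤ 'z' then
        let m := x.toNat - 97 + 1
        s1 ++ String.ofList [Char.ofNat (65 + m - 1)]
      else s1 ++ String.ofList [x]) acc = acc ++ String.ofList (l.map pvStepA) := by
  induction l with
  | nil => intro acc; simp
  | cons c l ih =>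
    intro acc
    simp only [List.foldl, List.map]
    rw [show (if 'a' ≤ c ∧ c ≤ 'z' then
        let m := c.toNat - 97 + 1
        acc ++ String.ofList [Char.ofNat (65 + m - 1)]
      else acc ++ String.ofList [c]) = acc ++ String.ofList [pvStepA c] by
        unfold pvStepA; split <;> rfl]
    rw [ih, String.append_assoc, ← String.ofList_append]
    rfl

-- ===== VERDICT (by name: the statement is the Claim_ definition above) =====
theorem word_capitallize_spec : Claim_equal_word_capitallize := by
  intro s hdom
  unfold Spec_word_capitallize word_capitallize word_capitallize_alt
  rw [pvFoldA]
  have hall : ∀ c ∈ s.toList, pvDomChar c = true := by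
    simpa [pvDomStr, Dom_word_capitallize, List.all_eq_true] using hdom
  have : s.toList.map pvStepA = s.toList.map (fun c => (pvUpperTable.lookup c).getD c) := by
    apply List.map_congr_left
    intro c hc
    exact pvStep_eq c (hall c hc)
  rw [show (fun c => (pvUpperTable.lookup c).getD c) = pvStepB from rfl] at this ⊢
  rw [← this]
  simp
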